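-- pv_equiv track=rewrite | github.com/TommasoMoro03/webrag | webrag/chunking/base.py | split_on_separators
-- ===== SOURCE A (Python) =====
-- from typing import Optional, Dict, Any, List
--
-- def split_on_separators(
--
--     text: str,
--     separators: List[str] = None
-- ) -> List[str]:
--     """
--     Split text on multiple separators in order of preference.
--
--     Args:
--         text: Text to split
--         separators: List of separators in preference order
--                    (default: paragraph, sentence, word boundaries)
--
--     Returns:
--         List of text segments
--     """
--     if separators is None:
--         separators = ['\n\n', '\n', '. ', ' ']
--
--     segments = [text]
--     for separator in separators:
--         new_segments = []
--         for segment in segments: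
--             new_segments.extend(segment.split(separator))
--         segments = new_segments
--
--     return [s.strip() for s in segments if s.strip()]
-- ===== SOURCE B (Python) =====
-- def split_on_separators(text, separators=None):
--     if separators is None:
--         separators = ['\n\n', '\n', '. ', ' ']
--     k = len(separators)
--     result = []
--     stack = [(text, 0)]
--     while stack:
--         t, i = stack.pop()
--         while i < k and separators[i] not in t:
--             i += 1
--         if i == k:
--             s = t.strip()
--             if s:
--                 result.append(s)
--         else:
--             i1 = i + 1
--             for p in reversed(t.split(separators[i])):
--                 stack.append((p, i1))
--     return result
-- ===== Notes on version B (the rewrite author's own statement) =====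
-- stated objective: alternative
-- what changed: Replaces A's level-order passes that rebuild the whole segment list once per separator with an explicit-stack depth-first descent of the separator hierarchy that first skips, per piece, separators not occurring in it.
import Mathlib
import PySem

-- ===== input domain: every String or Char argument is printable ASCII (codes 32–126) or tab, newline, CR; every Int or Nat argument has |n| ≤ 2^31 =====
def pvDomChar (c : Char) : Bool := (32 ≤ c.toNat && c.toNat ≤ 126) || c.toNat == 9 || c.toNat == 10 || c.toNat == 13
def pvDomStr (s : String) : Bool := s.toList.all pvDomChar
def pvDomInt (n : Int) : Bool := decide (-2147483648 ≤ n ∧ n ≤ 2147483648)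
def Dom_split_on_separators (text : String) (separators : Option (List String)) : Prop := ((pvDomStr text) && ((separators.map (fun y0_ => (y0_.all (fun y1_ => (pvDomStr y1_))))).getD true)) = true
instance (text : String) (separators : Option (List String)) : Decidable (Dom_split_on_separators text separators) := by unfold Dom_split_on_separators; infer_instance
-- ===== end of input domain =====

-- B rewrites the iterative segment-list rebuilding loop as a recursive descent over the separator hierarchy (objective: alternative decomposition).

-- B replaces A's level-order rebuild of the whole segment list per separator by an explicit-stack depth-first descent of the separator hierarchy (objective: alternative decomposition).

-- s.split(sep): exact for sep ≠ "" (Python raises ValueError on "", excluded by Pre_ below)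
def pySplit (s sep : String) : List String :=
  (PySem.Chars.splitOn s.toList sep.toList).map String.ofList

-- ===== PORT A =====
def split_on_separators (text : String) (separators : Option (List String)) : List String :=
  let seps := separators.getD ["\n\n", "\n", ". ", " "]
  let segments := seps.foldl
    (fun segments separator =>
      segments.foldl (fun new_segments segment => new_segments ++ pySplit segment separator) [])
    [text]
  segments.filterMap (fun s => if PySem.Str.strip s ≠ "" then some (PySem.Str.strip s) else none)

-- ===== PORT B =====
-- the inner `while i < k and separators[i] not in t: i += 1` skip loop
def skipNonMatching (seps : List String) (t : String) (i : Nat) : Nat :=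
  if h : i < seps.length then
    if PySem.Str.isIn (seps[i]'h) t then i else skipNonMatching seps t (i + 1)
  else i
termination_by seps.length - i

-- Python's `while stack:` loop; `fuel` is only a totality guard (start value proved sufficient in
-- bLoop_eq below), and Python's stack pops from the end with the reversed split pushed, so the
-- pieces come off in left-to-right order; here the list head is the stack top, pieces prepended in order.
def bLoop (seps : List String) : Nat → List (String × Nat) → List String → List String
  | 0, _, result => result
  | _ + 1, [], result => result
  | fuel + 1, (t, i0) :: stack, result =>
    if h : seps.length ≤ skipNonMatching seps t i0 then
      bLoop seps fuel stack (if PySem.Str.strip t ≠ "" then result ++ [PySem.Str.strip t] else result)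
    else
      bLoop seps fuel
        (((pySplit t (seps[skipNonMatching seps t i0]'(by omega))).map
            (fun p => (p, skipNonMatching seps t i0 + 1))) ++ stack) result

def split_on_separators_alt (text : String) (separators : Option (List String)) : List String :=
  let seps := separators.getD ["\n\n", "\n", ". ", " "]
  bLoop seps ((text.length + 1) * 3 ^ seps.length) [(text, 0)] []

-- ===== PRECONDITION & SPEC =====
-- Pre_ excludes only an empty-string separator, on which Python's str.split (hence A and B alike) raises ValueError.
def Pre_split_on_separators (text : String) (separators : Option (List String)) : Prop :=
  "" ∉ separators.getD ["\n\n", "\n", ". ", " "]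
instance (text : String) (separators : Option (List String)) : Decidable (Pre_split_on_separators text separators) := by unfold Pre_split_on_separators; infer_instance
def pvWitness_split_on_separators : String × Option (List String) := ("a b. c", none)

def Spec_split_on_separators (text : String) (separators : Option (List String)) (out : List String) : Prop := out = split_on_separators_alt text separators
instance (text : String) (separators : Option (List String)) (out : List String) : Decidable (Spec_split_on_separators text separators out) := by unfold Spec_split_on_separators; infer_instance

-- ===== CLAIM (what is proved, stated in full; the proofs are below) =====
def Claim_equal_split_on_separators : Prop := ∀ (text : String) (separators : Option (List String)), Dom_split_on_separators text separators → Pre_split_on_separators text separators → Spec_split_on_separators text separators (split_on_separators text separators)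

-- ===== LEMMAS AND PROOFS =====

-- weighted size of a split result, used only for bLoop's termination measure
def pvSw (ps : List (List Char)) : Nat := (ps.map (fun p => p.length + 1)).sum

theorem pvSw_go_le (sep : List Char) (fuel : Nat) : ∀ (l cur : List Char) (accs : List (List Char)),
    pvSw (PySem.Chars.splitOn.go sep fuel l cur accs) ≤ pvSw accs + (cur.length + l.length + 1) + fuel := by
  induction fuel with
  | zero =>
      intro l cur accs
      rw [PySem.Chars.splitOn.go]
      simp [pvSw]
  | succ n ih =>
      intro l cur accs
      cases l with
      | nil =>
          rw [PySem.Chars.splitOn.go]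
          · simp [pvSw]
          · omega
      | cons c rest =>
          rw [PySem.Chars.splitOn.go]
          split_ifs with hp
          · have h1 := ih (List.drop sep.length (c :: rest)) [] (cur.reverse :: accs)
            have h2 : (List.drop sep.length (c :: rest)).length ≤ rest.length + 1 := by
              simp [List.length_drop]
            simp [pvSw] at h1 ⊢
            omega
          · have h1 := ih rest (c :: cur) accs
            simp [pvSw] at h1 ⊢
            omega

theorem pvSw_splitOn_le (s sep : List Char) :
    pvSw (PySem.Chars.splitOn s sep) ≤ 2 * (s.length + 1) := by
  have h := pvSw_go_le sep (s.length + 1) s [] []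
  simp [pvSw, PySem.Chars.splitOn] at h ⊢
  omega

theorem pySplit_weight_le (t sep : String) :
    ((pySplit t sep).map (fun p => p.length + 1)).sum ≤ 2 * (t.length + 1) := by
  have h := pvSw_splitOn_le t.toList sep.toList
  simp [pySplit, pvSw, List.map_map, Function.comp_def] at h ⊢
  convert h using 2




-- hierarchical split by the separators from index i on (proof-side characterisation of both ports)
def hSplit (seps : List String) (i : Nat) (t : String) : List String :=
  if h : seps.length ≤ i then [t]
  else (pySplit t (seps[i]'(by omega))).flatMap (hSplit seps (i + 1))
termination_by seps.length - i

def altHelper : List String → String → List String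
  | [], t => [t]
  | sep :: rest, t => (pySplit t sep).flatMap (altHelper rest)

theorem hSplit_eq_altHelper (seps : List String) (i : Nat) (t : String) :
    hSplit seps i t = altHelper (seps.drop i) t := by
  induction i, t using hSplit.induct seps with
  | case1 i t h =>
      rw [hSplit, dif_pos h]
      simp [List.drop_of_length_le h, altHelper]
  | case2 i t h ih =>
      rw [hSplit, dif_neg h]
      rw [List.drop_eq_getElem_cons (show i < seps.length by omega)]
      simp only [altHelper]
      exact List.flatMap_congr (fun p _ => ih p)

theorem filterMap_flatMap_comm {α β γ : Type} (l : List α) (g : α → List β) (f : β → Option γ) :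
    (l.flatMap g).filterMap f = l.flatMap (fun a => (g a).filterMap f) := by
  induction l with
  | nil => simp
  | cons x xs ih => simp [List.flatMap_cons, List.filterMap_append, ih]

theorem go_no_match (sep : List Char) (fuel : Nat) : ∀ (l cur : List Char) (acc : List (List Char)),
    ¬ sep <:+: l → PySem.Chars.splitOn.go sep fuel l cur acc = ((cur.reverse ++ l) :: acc).reverse := by
  induction fuel with
  | zero => intro l cur acc _; rw [PySem.Chars.splitOn.go]
  | succ n ih =>
      intro l cur acc hinf
      cases l with
      | nil =>
          rw [PySem.Chars.splitOn.go]
          · simp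
          · omega
      | cons c rest =>
          rw [PySem.Chars.splitOn.go]
          rw [if_neg (by
            intro hpre
            exact hinf (List.IsPrefix.isInfix ((List.isPrefixOf_iff_prefix).mp hpre)))]
          rw [ih rest (c :: cur) acc (fun hr => hinf (hr.trans (List.suffix_cons c rest).isInfix))]
          simp

theorem pySplit_no_match (t sep : String) (h : PySem.Str.isIn sep t = false) :
    pySplit t sep = [t] := by
  have hinf : ¬ sep.toList <:+: t.toList := by
    simpa using (PySem.Chars.isIn_eq_false_iff sep.toList t.toList).mp (by simpa using h)
  have hgo := go_no_match sep.toList (t.toList.length + 1) t.toList [] [] hinf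
  simp [pySplit, PySem.Chars.splitOn]
  refine ⟨t.toList, ?_, by simp⟩
  simpa using hgo

theorem hSplit_skip (seps : List String) (t : String) : ∀ (i : Nat),
    hSplit seps i t = hSplit seps (skipNonMatching seps t i) t := by
  intro i
  induction i using skipNonMatching.induct seps t with
  | case1 i h hin => rw [skipNonMatching, dif_pos h, if_pos hin]
  | case2 i h hin ih =>
      rw [skipNonMatching, dif_pos h, if_neg hin]
      rw [hSplit, dif_neg (by omega), pySplit_no_match t _ (by simpa using hin)]
      simpa using ih
  | case3 i h => rw [skipNonMatching, dif_neg h]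

theorem le_skipNonMatching (seps : List String) (t : String) : ∀ (i : Nat), i ≤ skipNonMatching seps t i := by
  intro i
  induction i using skipNonMatching.induct seps t with
  | case1 i h hin => rw [skipNonMatching, dif_pos h, if_pos hin]
  | case2 i h hin ih => rw [skipNonMatching, dif_pos h, if_neg hin]; omega
  | case3 i h => rw [skipNonMatching, dif_neg h]

theorem weight_children_lt (seps : List String) (t : String) (i0 : Nat)
    (h : ¬ seps.length ≤ skipNonMatching seps t i0) :
    ((pySplit t (seps[skipNonMatching seps t i0]'(by omega))).map
        (fun p => (p.length + 1) * 3 ^ (seps.length - (skipNonMatching seps t i0 + 1)))).sum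
      < (t.length + 1) * 3 ^ (seps.length - i0) := by
  have hge : i0 ≤ skipNonMatching seps t i0 := le_skipNonMatching seps t i0
  have hlt : skipNonMatching seps t i0 < seps.length := by omega
  have hs : seps.length - (i0 + 1) + 1 = seps.length - i0 := by omega
  have h2 : ((pySplit t (seps[skipNonMatching seps t i0]'(by omega))).map
      (fun p => (p.length + 1) * 3 ^ (seps.length - (skipNonMatching seps t i0 + 1)))).sum
      = ((pySplit t (seps[skipNonMatching seps t i0]'(by omega))).map (fun p => p.length + 1)).sum
        * 3 ^ (seps.length - (skipNonMatching seps t i0 + 1)) := by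
    rw [← List.sum_map_mul_right]
  have h3 := pySplit_weight_le t (seps[skipNonMatching seps t i0]'(by omega))
  have hpowle : (3:Nat) ^ (seps.length - (skipNonMatching seps t i0 + 1))
      ≤ 3 ^ (seps.length - (i0 + 1)) :=
    Nat.pow_le_pow_right (by norm_num) (by omega)
  calc ((pySplit t (seps[skipNonMatching seps t i0]'(by omega))).map
          (fun p => (p.length + 1) * 3 ^ (seps.length - (skipNonMatching seps t i0 + 1)))).sum
      ≤ 2 * (t.length + 1) * 3 ^ (seps.length - (skipNonMatching seps t i0 + 1)) := by
        rw [h2]; exact Nat.mul_le_mul_right _ h3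
    _ ≤ 2 * (t.length + 1) * 3 ^ (seps.length - (i0 + 1)) :=
        Nat.mul_le_mul_left _ hpowle
    _ < 3 * (t.length + 1) * 3 ^ (seps.length - (i0 + 1)) := by
        have hp : 0 < 3 ^ (seps.length - (i0 + 1)) := by positivity
        have ht : 2 * (t.length + 1) < 3 * (t.length + 1) := by omega
        exact Nat.mul_lt_mul_of_lt_of_le ht (le_refl _) (by positivity)
    _ = (t.length + 1) * 3 ^ (seps.length - i0) := by
        rw [← hs, pow_succ]; ring

theorem bLoop_eq (seps : List String) : ∀ (fuel : Nat) (stack : List (String × Nat)) (result : List String),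
    (stack.map (fun e => (e.1.length + 1) * 3 ^ (seps.length - e.2))).sum ≤ fuel →
    bLoop seps fuel stack result
    = result ++ stack.flatMap (fun e =>
        (hSplit seps e.2 e.1).filterMap
          (fun s => if PySem.Str.strip s ≠ "" then some (PySem.Str.strip s) else none)) := by
  intro fuel
  induction fuel with
  | zero =>
      intro stack result hle
      cases stack with
      | nil => simp [bLoop]
      | cons e rest =>
          exfalso
          simp only [List.map_cons, List.sum_cons] at hle
          have h1 : 1 ≤ (e.1.length + 1) * 3 ^ (seps.length - e.2) :=
            Nat.one_le_iff_ne_zero.mpr (by positivity)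
          omega
  | succ n ih =>
      intro stack result hle
      cases stack with
      | nil => simp [bLoop]
      | cons e rest =>
          obtain ⟨t, i0⟩ := e
          simp only [List.map_cons, List.sum_cons] at hle
          rw [bLoop]
          by_cases h : seps.length ≤ skipNonMatching seps t i0
          · rw [dif_pos h]
            rw [ih rest _ (by
              have h1 : 1 ≤ (t.length + 1) * 3 ^ (seps.length - i0) :=
                Nat.one_le_iff_ne_zero.mpr (by positivity)
              omega)]
            rw [List.flatMap_cons, hSplit_skip seps t i0, hSplit, dif_pos h]
            simp only [List.filterMap_cons]
            split_ifs <;> simp_all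
          · rw [dif_neg h]
            rw [ih _ result (by
              simp only [List.map_append, List.sum_append, List.map_map, Function.comp_def]
              have h2 := weight_children_lt seps t i0 h
              omega)]
            rw [List.flatMap_cons, hSplit_skip seps t i0, hSplit, dif_neg h]
            simp only [List.flatMap_append, List.flatMap_map, filterMap_flatMap_comm]

theorem foldl_split_eq_altHelper (seps : List String) : ∀ (segs : List String),
    seps.foldl
      (fun segments separator =>
        segments.foldl (fun ns segment => ns ++ pySplit segment separator) [])
      segs
    = segs.flatMap (altHelper seps) := by
  induction seps with
  | nil => intro segs; simp [altHelper]
  | cons sep rest ih =>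
      intro segs
      rw [List.foldl_cons,
        show (List.foldl (fun ns segment => ns ++ pySplit segment sep) [] segs)
            = segs.flatMap (fun x => pySplit x sep) from by
          simp [List.flatMap_def],
        ih, List.flatMap_assoc]
      rfl

theorem split_on_separators_spec : Claim_equal_split_on_separators := by
  intro text separators _ _
  show split_on_separators text separators = split_on_separators_alt text separators
  simp only [split_on_separators, split_on_separators_alt]
  rw [foldl_split_eq_altHelper, bLoop_eq _ _ _ _ (by simp)]
  simp [hSplit_eq_altHelper]
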